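-- pv_equiv track=rewrite | github.com/RufinaMay/MedicalReports_v1 | utils/utils.py | apply_hierarchy
-- ===== SOURCE A (Python) =====
-- from collections import Counter
--
-- def apply_hierarchy(train_set, valid_set, test_set):
--     number_of_tags = Counter()
--     for img in train_set:
--         for label in train_set[img]:
--             number_of_tags[label] += 1
--
--     new_train_set, new_valid_set, new_test_set = {}, {}, {}
--     for img in train_set:
--         out = []
--         for tag in number_of_tags:
--             if tag in train_set[img]:
--                 out.append(tag)
--         new_train_set[img] = out
--
--     for img in valid_set:
--         out = []
--         for tag in number_of_tags:
--             if tag in valid_set[img]: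
--                 out.append(tag)
--         new_valid_set[img] = out
--
--     for img in test_set:
--         out = []
--         for tag in number_of_tags:
--             if tag in test_set[img]:
--                 out.append(tag)
--         new_test_set[img] = out
--
--     return new_train_set, new_valid_set, new_test_set
-- ===== SOURCE B (Python) =====
-- def apply_hierarchy(train_set, valid_set, test_set):
--     # rank: training tag -> its first-seen position among all training labels
--     flat = (t for labels in train_set.values() for t in labels)
--     rank = {t: i for i, t in enumerate(dict.fromkeys(flat))}
--
--     def reorder(d):
--         return {img: sorted(set(labels) & rank.keys(), key=rank.get)
--                 for img, labels in d.items()}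
--
--     return reorder(train_set), reorder(valid_set), reorder(test_set)
-- ===== Notes on version B (the rewrite author's own statement) =====
-- stated objective: faster
-- what changed: A builds a Counter with a nested loop and then, for every image, scans every distinct training tag and tests membership in the image's label list; B builds a tag->rank dict once from the deduplicated flattened training labels and, per image, sorts the set of known labels by rank.
import Mathlib
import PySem

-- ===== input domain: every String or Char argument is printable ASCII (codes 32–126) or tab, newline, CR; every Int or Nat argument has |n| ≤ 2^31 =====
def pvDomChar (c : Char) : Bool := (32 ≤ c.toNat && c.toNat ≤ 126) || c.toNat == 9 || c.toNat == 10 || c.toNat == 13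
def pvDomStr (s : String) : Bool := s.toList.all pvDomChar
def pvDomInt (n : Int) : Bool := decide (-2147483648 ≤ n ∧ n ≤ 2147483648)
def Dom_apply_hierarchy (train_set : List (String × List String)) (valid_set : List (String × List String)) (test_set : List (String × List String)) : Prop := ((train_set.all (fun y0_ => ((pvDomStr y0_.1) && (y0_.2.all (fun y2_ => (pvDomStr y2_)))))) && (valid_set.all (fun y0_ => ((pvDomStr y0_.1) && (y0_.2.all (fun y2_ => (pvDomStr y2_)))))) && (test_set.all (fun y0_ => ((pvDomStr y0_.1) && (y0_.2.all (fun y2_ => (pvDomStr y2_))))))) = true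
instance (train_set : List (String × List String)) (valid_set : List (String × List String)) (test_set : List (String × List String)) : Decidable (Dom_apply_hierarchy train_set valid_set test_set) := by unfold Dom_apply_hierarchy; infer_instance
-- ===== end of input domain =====

-- B replaces A's per-image scan over all counter keys (Counter built by a nested loop) by a tag->rank
-- map built once from the deduplicated flattened training labels, then per image a sort of the known
-- labels by rank. Return-value equivalence; neither version mutates its arguments.

-- ===== PORT A =====
def pvCountA (train_set : List (String × List String)) : PySem.Dict String Int :=
  train_set.foldl (fun d p => p.2.foldl (fun d label => d.modify label 0 (· + 1)) d) PySem.Dict.empty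

def pvFilterA (nt : PySem.Dict String Int) (labels : List String) : List String :=
  nt.keys.foldl (fun out tag => if labels.contains tag then out ++ [tag] else out) []

def pvRebuildA (nt : PySem.Dict String Int) (d : List (String × List String)) : List (String × List String) :=
  (d.foldl (fun acc p => acc.insert p.1 (pvFilterA nt p.2)) PySem.Dict.empty).items

def apply_hierarchy (train_set : List (String × List String)) (valid_set : List (String × List String)) (test_set : List (String × List String)) : (List (String × List String)) × (List (String × List String)) × (List (String × List String)) :=
  let number_of_tags := pvCountA train_set
  (pvRebuildA number_of_tags train_set, pvRebuildA number_of_tags valid_set, pvRebuildA number_of_tags test_set)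

-- ===== PORT B =====
-- rank = {t: i for i, t in enumerate(dict.fromkeys(flattened training labels))}, an assoc list with
-- distinct keys (first-match lookup pvGetRank is exact for it)
def pvRankB (train_set : List (String × List String)) : List (String × Int) :=
  (PySem.List.enumerate (PySem.List.dedup (train_set.flatMap (fun p => p.2)))).map (fun q => (q.2, q.1))

def pvGetRank : List (String × Int) → String → Option Int
  | [], _ => none
  | (k, i) :: rest, t => if k = t then some i else pvGetRank rest t

-- sorted(set(labels) & rank.keys(), key=rank.get); the sort key is injective on the known tags,
-- so the hash order of the intersected set cannot influence the result
def pvReorderB (rank : List (String × Int)) (labels : List String) : List String :=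
  PySem.List.sorted
    ((PySem.Set.ofList labels).filter (fun t => (pvGetRank rank t).isSome))
    (fun t => (pvGetRank rank t).getD 0) false

def apply_hierarchy_alt (train_set : List (String × List String)) (valid_set : List (String × List String)) (test_set : List (String × List String)) : (List (String × List String)) × (List (String × List String)) × (List (String × List String)) :=
  let rank := pvRankB train_set
  (train_set.map (fun p => (p.1, pvReorderB rank p.2)),
   valid_set.map (fun p => (p.1, pvReorderB rank p.2)),
   test_set.map (fun p => (p.1, pvReorderB rank p.2)))

-- ===== PRECONDITION & SPEC =====
-- The Python arguments are dicts, whose keys are necessarily distinct; Pre_ restricts the association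
-- lists to exactly those that represent a Python dict (it excludes no input the Python A accepts).
def Pre_apply_hierarchy (train_set : List (String × List String)) (valid_set : List (String × List String)) (test_set : List (String × List String)) : Prop :=
  (train_set.map Prod.fst).Nodup ∧ (valid_set.map Prod.fst).Nodup ∧ (test_set.map Prod.fst).Nodup
instance (train_set : List (String × List String)) (valid_set : List (String × List String)) (test_set : List (String × List String)) : Decidable (Pre_apply_hierarchy train_set valid_set test_set) := by unfold Pre_apply_hierarchy; infer_instance

def pvWitness_apply_hierarchy : (List (String × List String)) × (List (String × List String)) × (List (String × List String)) :=
  ([("i0", ["b", "a", "b"]), ("i1", ["a"])], [("j0", ["a", "c"])], [("k0", ["b"])])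

def Spec_apply_hierarchy (train_set : List (String × List String)) (valid_set : List (String × List String)) (test_set : List (String × List String)) (out : (List (String × List String)) × (List (String × List String)) × (List (String × List String))) : Prop := out = apply_hierarchy_alt train_set valid_set test_set
instance (train_set : List (String × List String)) (valid_set : List (String × List String)) (test_set : List (String × List String)) (out : (List (String × List String)) × (List (String × List String)) × (List (String × List String))) : Decidable (Spec_apply_hierarchy train_set valid_set test_set out) := by unfold Spec_apply_hierarchy; infer_instance

-- ===== CLAIM (what is proved, stated in full; the proofs are below) =====
def Claim_equal_apply_hierarchy : Prop := ∀ (train_set : List (String × List String)) (valid_set : List (String × List String)) (test_set : List (String × List String)), Dom_apply_hierarchy train_set valid_set test_set → Pre_apply_hierarchy train_set valid_set test_set → Spec_apply_hierarchy train_set valid_set test_set (apply_hierarchy train_set valid_set test_set)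

-- ===== LEMMAS AND PROOFS =====

-- A's Counter is the Counter of the flattened training labels
lemma pv_countA_eq (ts : List (String × List String)) :
    pvCountA ts = PySem.Dict.counter (ts.flatMap (fun p => p.2)) := by
  unfold pvCountA
  rw [PySem.Dict.counter_eq_foldl]
  suffices h : ∀ D : PySem.Dict String Int,
      ts.foldl (fun d p => p.2.foldl (fun d label => d.modify label 0 (· + 1)) d) D
        = (ts.flatMap (fun p => p.2)).foldl (fun d x => d.modify x 0 (· + 1)) D from h _
  induction ts with
  | nil => intro D; rfl
  | cons p ts ih => intro D; rw [List.foldl_cons, List.flatMap_cons, List.foldl_append, ih]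

-- A's iteration over the Counter keys visits the tags in first-occurrence order of the flattened labels
lemma pv_keysA (ts : List (String × List String)) :
    (pvCountA ts).keys = PySem.List.dedup (ts.flatMap (fun p => p.2)) := by
  rw [pv_countA_eq, PySem.Dict.keys_counter, PySem.List.dedup_eq_ofList]

-- first-match lookup in B's rank list: position of the first occurrence
lemma pv_getRank_enum (l : List String) (t : String) : ∀ s : Int,
    pvGetRank ((PySem.List.enumerate l s).map (fun q => (q.2, q.1))) t
      = if t ∈ l then some (s + (l.idxOf t : Int)) else none := by
  induction l with
  | nil => intro s; simp [pvGetRank]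
  | cons x l ih =>
      intro s
      rw [PySem.List.enumerate_cons, List.map_cons]
      by_cases hx : x = t
      · subst hx
        simp [pvGetRank, List.idxOf_cons_self]
      · have ht : t ≠ x := fun h => hx h.symm
        simp only [pvGetRank, if_neg hx, ih (s + 1), List.mem_cons,
          List.idxOf_cons_ne _ (fun h => hx h)]
        by_cases hm : t ∈ l
        · simp only [hm, or_true, if_pos]
          congr 1
          push_cast
          ring
        · simp [hm, ht]

lemma pv_getRank_isSome (ts : List (String × List String)) (t : String) :
    (pvGetRank (pvRankB ts) t).isSome = true
      ↔ t ∈ PySem.List.dedup (ts.flatMap (fun p => p.2)) := by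
  unfold pvRankB
  rw [pv_getRank_enum _ t 0]
  by_cases hm : t ∈ PySem.List.dedup (ts.flatMap (fun p => p.2))
  · rw [if_pos hm]
    simpa using hm
  · rw [if_neg hm]
    simpa using hm

lemma pv_getRank_getD (ts : List (String × List String)) (t : String)
    (hm : t ∈ PySem.List.dedup (ts.flatMap (fun p => p.2))) :
    (pvGetRank (pvRankB ts) t).getD 0
      = ((PySem.List.dedup (ts.flatMap (fun p => p.2))).idxOf t : Int) := by
  unfold pvRankB
  rw [pv_getRank_enum _ t 0, if_pos hm]
  simp

-- A's per-image pass over the Counter keys equals B's sort-by-rank of the known labels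
lemma pv_filter_eq_reorder (ts : List (String × List String)) (labels : List String) :
    pvFilterA (pvCountA ts) labels = pvReorderB (pvRankB ts) labels := by
  set L := PySem.List.dedup (ts.flatMap (fun p => p.2)) with hL
  have h1 : pvFilterA (pvCountA ts) labels = L.filter (fun tag => labels.contains tag) := by
    unfold pvFilterA
    rw [pv_keysA, ← hL, PySem.List.foldl_append_if_eq_filter]; rfl
  have hLnd : L.Nodup := by rw [hL, PySem.List.dedup_eq_ofList]; exact PySem.Set.nodup_ofList _
  rw [h1]
  unfold pvReorderB
  refine (PySem.List.sorted_eq_of_perm_of_pairwise_lt _ _ _ ?_ ?_).symm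
  · refine (List.perm_ext_iff_of_nodup (hLnd.filter _)
      ((PySem.Set.nodup_ofList labels).filter _)).mpr ?_
    intro x
    simp only [List.mem_filter, PySem.Set.mem_ofList, pv_getRank_isSome, ← hL]
    constructor
    · rintro ⟨hxL, hxl⟩; exact ⟨by simpa using hxl, by simpa using hxL⟩
    · rintro ⟨hxl, hxL⟩; exact ⟨by simpa using hxL, by simpa using hxl⟩
  · have hpk : L.Pairwise (fun a b => (pvGetRank (pvRankB ts) a).getD 0
        < (pvGetRank (pvRankB ts) b).getD 0) := by
      have hmem : ∀ x ∈ L, x ∈ PySem.List.dedup (ts.flatMap (fun p => p.2)) :=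
        fun x hx => hL ▸ hx
      rw [List.pairwise_iff_getElem]
      intro i j hi hj hij
      rw [pv_getRank_getD ts _ (hmem _ (List.getElem_mem hi)),
        pv_getRank_getD ts _ (hmem _ (List.getElem_mem hj)),
        hLnd.idxOf_getElem i hi, hLnd.idxOf_getElem j hj]
      exact_mod_cast hij
    exact hpk.sublist (List.filter_sublist)

-- rebuilding a dict with distinct keys is a map over its items
lemma pv_items_foldl_insert (f : List String → List String)
    (d : List (String × List String)) :
    ∀ (D : PySem.Dict String (List String)),
      (d.map Prod.fst).Nodup → (∀ k ∈ d.map Prod.fst, D.contains k = false) →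
      (d.foldl (fun acc p => acc.insert p.1 (f p.2)) D).items
        = D.items ++ d.map (fun p => (p.1, f p.2)) := by
  induction d with
  | nil => intro D _ _; simp
  | cons p d ih =>
      intro D hnd hfresh
      rw [List.map_cons] at hnd hfresh
      obtain ⟨hp1, htl⟩ := List.nodup_cons.mp hnd
      rw [List.foldl_cons, List.map_cons,
        ih (D.insert p.1 (f p.2)) htl ?_]
      · rw [PySem.Dict.items_insert_of_not_contains D (f p.2)
          (hfresh p.1 (List.mem_cons_self)), List.append_assoc]
        rfl
      · intro k hk
        have hne : k ≠ p.1 := fun he => hp1 (he ▸ hk)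
        rw [PySem.Dict.contains_insert]
        simp [hne, hfresh k (List.mem_cons_of_mem _ hk)]

lemma pv_rebuild_eq (ts d : List (String × List String)) (hnd : (d.map Prod.fst).Nodup) :
    pvRebuildA (pvCountA ts) d = d.map (fun p => (p.1, pvReorderB (pvRankB ts) p.2)) := by
  unfold pvRebuildA
  rw [pv_items_foldl_insert (pvFilterA (pvCountA ts)) d PySem.Dict.empty hnd
    (by intro k _; simp [PySem.Dict.contains_empty])]
  simp only [PySem.Dict.empty, List.nil_append]
  exact List.map_congr_left (fun p _ => by rw [pv_filter_eq_reorder])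

-- ===== VERDICT (by name: the statement is the Claim_ definition above) =====
theorem apply_hierarchy_spec : Claim_equal_apply_hierarchy := by
  intro train_set valid_set test_set _ hpre
  obtain ⟨h1, h2, h3⟩ := hpre
  unfold Spec_apply_hierarchy apply_hierarchy apply_hierarchy_alt
  dsimp only
  rw [pv_rebuild_eq _ _ h1, pv_rebuild_eq _ _ h2, pv_rebuild_eq _ _ h3]
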